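-- pv_equiv track=rewrite | github.com/edgelesssys/privatemode-document-store-demo | privatemode/document_store/query_advanced.py | filter_messages
-- ===== SOURCE A (Python) =====
-- from typing import List, Dict, Any, Optional, cast
--
-- def filter_messages(messages: List[Dict[str, Any]], k: int) -> List[str]:
--     filtered = []
--     arr = messages if isinstance(messages, list) else []
--     for i in range(len(arr) - 1, -1, -1):
--         if len(filtered) >= k:
--             break
--         msg = arr[i]
--         content = msg.get("content", "")
--         if msg.get("role") != "system" and content and isinstance(content, str) and content.strip():
--             filtered.append(content.strip())
--     return filtered
-- ===== SOURCE B (Python) =====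
-- def filter_messages(messages, k):
--     arr = messages if isinstance(messages, list) else []
--     forward = [
--         msg.get("content", "").strip()
--         for msg in arr
--         if msg.get("role") != "system"
--         and msg.get("content", "")
--         and isinstance(msg.get("content", ""), str)
--         and msg.get("content", "").strip()
--     ]
--     if k <= 0:
--         return []
--     return list(reversed(forward[-k:]))
-- ===== Notes on version B (the rewrite author's own statement) =====
-- stated objective: simpler
-- what changed: Replaces A's reverse index loop with an early break and a length-capped accumulator by a single forward filtering pass followed by taking the last k elements and reversing them.
import Mathlib
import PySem

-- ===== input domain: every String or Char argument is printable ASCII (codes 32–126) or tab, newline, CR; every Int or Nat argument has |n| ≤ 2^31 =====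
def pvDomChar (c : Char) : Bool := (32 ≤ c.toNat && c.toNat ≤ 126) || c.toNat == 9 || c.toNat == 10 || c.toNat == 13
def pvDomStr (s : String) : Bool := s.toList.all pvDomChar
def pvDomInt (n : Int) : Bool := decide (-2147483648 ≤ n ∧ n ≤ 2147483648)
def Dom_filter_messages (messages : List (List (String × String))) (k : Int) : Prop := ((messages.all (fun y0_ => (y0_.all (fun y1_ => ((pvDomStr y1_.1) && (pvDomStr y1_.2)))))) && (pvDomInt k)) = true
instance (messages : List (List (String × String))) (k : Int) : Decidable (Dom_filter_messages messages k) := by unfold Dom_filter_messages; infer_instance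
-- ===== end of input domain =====

-- B replaces A's reverse index loop (early break once k items are collected) by one forward
-- filtering pass plus "last k, reversed" — simpler decomposition, same O(n) cost.

-- ===== PORT A =====
-- A's reverse loop: for i in range(len(arr)-1, -1, -1), break when len(filtered) >= k.
def filterMessagesLoopA (arr : List (List (String × String))) (k : Int) :
    List Int → List String → List String
  | [], filtered => filtered
  | i :: rest, filtered =>
    if k ≤ (filtered.length : Int) then filtered
    else
      let msg := PySem.List.pyGetD arr i []
      let content := (PySem.Dict.mk msg).getD "content" ""
      if ((PySem.Dict.mk msg).get? "role" != some "system") && (content != "")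
          && (PySem.Str.strip content != "") then
        filterMessagesLoopA arr k rest (filtered ++ [PySem.Str.strip content])
      else
        filterMessagesLoopA arr k rest filtered

def filter_messages (messages : List (List (String × String))) (k : Int) : List String :=
  let arr := messages    -- 'messages if isinstance(messages, list) else []': always a list here
  filterMessagesLoopA arr k (PySem.List.pyRange ((arr.length : Int) - 1) (-1) (-1)) []

-- ===== PORT B =====
-- one forward comprehension, then last k reversed (k <= 0 guarded)
def filterMessagesKeepB (msg : List (String × String)) : Option String :=
  let content := (PySem.Dict.mk msg).getD "content" ""
  if ((PySem.Dict.mk msg).get? "role" != some "system") && (content != "")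
      && (PySem.Str.strip content != "") then some (PySem.Str.strip content)
  else none

def filter_messages_alt (messages : List (List (String × String))) (k : Int) : List String :=
  let forward := messages.filterMap filterMessagesKeepB
  if k ≤ 0 then []
  else (PySem.List.slice forward (some (-k)) none).reverse

-- ===== PRECONDITION & SPEC =====
def Spec_filter_messages (messages : List (List (String × String))) (k : Int) (out : List String) : Prop := out = filter_messages_alt messages k
instance (messages : List (List (String × String))) (k : Int) (out : List String) : Decidable (Spec_filter_messages messages k out) := by unfold Spec_filter_messages; infer_instance

-- ===== CLAIM (what is proved, stated in full; the proofs are below) =====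
def Claim_equal_filter_messages : Prop := ∀ (messages : List (List (String × String))) (k : Int), Dom_filter_messages messages k → Spec_filter_messages messages k (filter_messages messages k)

-- ===== LEMMAS AND PROOFS =====

-- A's loop over indices m-1, m-2, …, 0 collects, onto acc, the reversed filtered prefix
-- capped at k - |acc| elements.
theorem filterMessagesLoopA_eq (arr : List (List (String × String))) (k : Int) :
    ∀ (m : Nat) (acc : List String), m ≤ arr.length →
      filterMessagesLoopA arr k (PySem.List.pyRange ((m : Int) - 1) (-1) (-1)) acc =
        acc ++ (((arr.take m).filterMap filterMessagesKeepB).reverse).take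
          ((k - (acc.length : Int)).toNat) := by
  intro m
  induction m with
  | zero =>
    intro acc _
    rw [PySem.List.pyRange_neg_one_eq_nil (by omega)]
    simp [filterMessagesLoopA]
  | succ m ih =>
    intro acc hm
    rw [show ((m + 1 : Nat) : Int) - 1 = (m : Int) from by omega,
        PySem.List.pyRange_neg_one_cons (by omega)]
    have hmlt : m < arr.length := by omega
    have htake : arr.take (m + 1) = arr.take m ++ [arr[m]] := by
      rw [List.take_add_one]
      · simp [List.getElem?_eq_getElem hmlt]
    by_cases hk : k ≤ (acc.length : Int)
    · simp only [filterMessagesLoopA, if_pos hk]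
      have : (k - (acc.length : Int)).toNat = 0 := by omega
      simp [this]
    · simp only [filterMessagesLoopA, if_neg hk]
      have hget : PySem.List.pyGetD arr (m : Int) [] = arr[m] := by
        rw [PySem.List.pyGetD_natCast]
        simp [List.getD_eq_getElem?_getD, List.getElem?_eq_getElem hmlt]
      rw [hget]
      by_cases hp : (((PySem.Dict.mk arr[m]).get? "role" != some "system")
          && ((PySem.Dict.mk arr[m]).getD "content" "" != "")
          && (PySem.Str.strip ((PySem.Dict.mk arr[m]).getD "content" "") != "")) = true
      · rw [if_pos hp, ih _ (by omega)]
        have hkeep : filterMessagesKeepB arr[m] =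
            some (PySem.Str.strip ((PySem.Dict.mk arr[m]).getD "content" "")) := by
          simp only [filterMessagesKeepB, if_pos hp]
        rw [htake, List.filterMap_append]
        simp only [List.filterMap_cons, hkeep, List.filterMap_nil, List.reverse_append]
        have hn : (k - (acc.length : Int)).toNat = (k - ((acc.length : Int) + 1)).toNat + 1 := by
          omega
        simp [hn, List.take_succ_cons]
      · rw [if_neg hp, ih _ (by omega)]
        have hkeep : filterMessagesKeepB arr[m] = none := by
          simp only [filterMessagesKeepB]
          rw [if_neg hp]
        rw [htake, List.filterMap_append]
        simp [hkeep]

-- ===== VERDICT (by name: the statement is the Claim_ definition above) =====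
theorem filter_messages_spec : Claim_equal_filter_messages := by
  intro messages k _
  unfold Spec_filter_messages filter_messages filter_messages_alt
  rw [filterMessagesLoopA_eq messages k messages.length [] (le_refl _)]
  simp only [List.take_length, List.nil_append, List.length_nil, Nat.cast_zero, sub_zero]
  by_cases hk : k ≤ 0
  · have : k.toNat = 0 := by omega
    simp [hk, this]
  · rw [if_neg hk]
    rw [show (-k : Int) = -((k.toNat : Nat) : Int) from by omega,
        PySem.List.slice_from_neg_natCast _ _ (by omega)]
    exact List.take_reverse
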